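-- pv_equiv track=rewrite | github.com/HubbleNetwork/sdr-docker | src/stream_web/decoder.py | _lfsr7_symbols
-- ===== SOURCE A (Python) =====
-- def _lfsr7_symbols(seed: int, nsym: int) -> list[int]:
--     """Generate LFSR-7 whitening symbols (6-bit) for de-scrambling."""
--     state = (3 << 5) | (0b1000000 | seed)
--     bits = []
--     for _ in range(nsym * 6):
--         bits.append((state & 0x40) >> 6)
--         fb = ((state >> 6) ^ (state >> 3)) & 1
--         state = ((state << 1) & 0x7F) | fb
--     return [int("".join(map(str, bits[i * 6:(i + 1) * 6])), 2) for i in range(nsym)]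
-- ===== SOURCE B (Python) =====
-- def _lfsr7_symbols(seed: int, nsym: int) -> list[int]:
--     """Generate LFSR-7 whitening symbols (6-bit) for de-scrambling."""
--     state = (3 << 5) | (0b1000000 | seed)
--     out = []
--     for _ in range(nsym):
--         sym = 0
--         for _ in range(6):
--             sym = sym * 2 + ((state & 0x40) >> 6)
--             fb = ((state >> 6) ^ (state >> 3)) & 1
--             state = ((state << 1) & 0x7F) | fb
--         out.append(sym)
--     return out
-- ===== Notes on version B (the rewrite author's own statement) =====
-- stated objective: simpler
-- what changed: B drops A's two-phase pipeline (flat bit list, then string join + int(,2) repacking) and emits each 6-bit symbol directly with a nested loop accumulating sym = sym*2 + bit, with no intermediate bit list or string conversion.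
import Mathlib
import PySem

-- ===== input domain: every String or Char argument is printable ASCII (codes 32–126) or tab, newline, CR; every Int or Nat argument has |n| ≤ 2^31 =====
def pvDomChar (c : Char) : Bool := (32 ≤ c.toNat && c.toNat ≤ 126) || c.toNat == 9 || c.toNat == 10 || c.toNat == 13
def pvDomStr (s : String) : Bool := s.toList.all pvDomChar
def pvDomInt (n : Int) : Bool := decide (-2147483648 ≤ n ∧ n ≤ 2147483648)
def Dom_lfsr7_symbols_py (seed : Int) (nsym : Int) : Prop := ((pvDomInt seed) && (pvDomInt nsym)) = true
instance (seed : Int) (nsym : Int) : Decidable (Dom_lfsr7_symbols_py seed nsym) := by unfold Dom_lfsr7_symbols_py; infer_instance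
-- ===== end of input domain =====

-- B replaces A's two-phase pipeline (flat bit list, then string join + int(,2)) by directly
-- accumulating each 6-bit symbol in a nested loop (objective: simpler).

-- ===== PORT A =====
-- int(s, 2) is ported as (PySem.Int.ofStrBase? s 2).getD 0; it never raises here: the joined
-- string is always six binary digits, so the ValueError branch (none) is unreachable.
-- loop body of A's 'for _ in range(nsym * 6)': append the output bit, then update the state
def lfsr7A_body (acc : List Int × Int) (_ : Int) : List Int × Int :=
  (acc.1 ++ [(PySem.Int.band acc.2 0x40) >>> 6],
   PySem.Int.bor (PySem.Int.band (acc.2 <<< 1) 0x7F)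
     (PySem.Int.band (PySem.Int.bxor (acc.2 >>> 6) (acc.2 >>> 3)) 1))

def lfsr7_symbols_py (seed : Int) (nsym : Int) : List Int :=
  let state : Int := PySem.Int.bor (3 <<< 5) (PySem.Int.bor 64 seed)
  let r := (PySem.List.pyRange 0 (nsym * 6) 1).foldl lfsr7A_body ([], state)
  (PySem.List.pyRange 0 nsym 1).map (fun i =>
    (PySem.Int.ofStrBase?
      (PySem.Str.join "" ((PySem.List.slice r.1 (some (i * 6)) (some ((i + 1) * 6))).map PySem.Int.toStr)) 2).getD 0)

-- ===== PORT B =====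
-- body of B's inner 'for _ in range(6)': shift the bit into sym, then update the state
def lfsr7B_inner (p : Int × Int) (_ : Int) : Int × Int :=
  (p.1 * 2 + ((PySem.Int.band p.2 0x40) >>> 6),
   PySem.Int.bor (PySem.Int.band (p.2 <<< 1) 0x7F)
     (PySem.Int.band (PySem.Int.bxor (p.2 >>> 6) (p.2 >>> 3)) 1))

-- body of B's outer 'for _ in range(nsym)': run the inner loop from sym = 0, append the symbol
def lfsr7B_body (acc : List Int × Int) (_ : Int) : List Int × Int :=
  let inner := (PySem.List.pyRange 0 6 1).foldl lfsr7B_inner (0, acc.2)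
  (acc.1 ++ [inner.1], inner.2)

def lfsr7_symbols_py_alt (seed : Int) (nsym : Int) : List Int :=
  let state : Int := PySem.Int.bor (3 <<< 5) (PySem.Int.bor 64 seed)
  let r := (PySem.List.pyRange 0 nsym 1).foldl lfsr7B_body ([], state)
  r.1

-- ===== PRECONDITION & SPEC =====
def Spec_lfsr7_symbols_py (seed : Int) (nsym : Int) (out : List Int) : Prop := out = lfsr7_symbols_py_alt seed nsym
instance (seed : Int) (nsym : Int) (out : List Int) : Decidable (Spec_lfsr7_symbols_py seed nsym out) := by unfold Spec_lfsr7_symbols_py; infer_instance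

-- ===== CLAIM (what is proved, stated in full; the proofs are below) =====
def Claim_equal_lfsr7_symbols_py : Prop := ∀ (seed : Int) (nsym : Int), Dom_lfsr7_symbols_py seed nsym → Spec_lfsr7_symbols_py seed nsym (lfsr7_symbols_py seed nsym)

-- ===== LEMMAS AND PROOFS =====

-- the shared per-bit step: output bit and next state of the LFSR
def pvBit (s : Int) : Int := (PySem.Int.band s 0x40) >>> 6
def pvStep (s : Int) : Int :=
  PySem.Int.bor (PySem.Int.band (s <<< 1) 0x7F)
    (PySem.Int.band (PySem.Int.bxor (s >>> 6) (s >>> 3)) 1)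

def pvGenBits : Nat → Int → List Int
  | 0, _ => []
  | n + 1, s => pvBit s :: pvGenBits n (pvStep s)

def pvPack6 (s : Int) : Int := List.foldl (fun a b => a * 2 + b) 0 (pvGenBits 6 s)

def pvPackList : Nat → Int → List Int
  | 0, _ => []
  | k + 1, s => pvPack6 s :: pvPackList k (pvStep^[6] s)

def pvStepA (acc : List Int × Int) : List Int × Int := (acc.1 ++ [pvBit acc.2], pvStep acc.2)
def pvStepI (p : Int × Int) : Int × Int := (p.1 * 2 + pvBit p.2, pvStep p.2)
def pvStepB (acc : List Int × Int) : List Int × Int :=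
  (acc.1 ++ [(pvStepI^[6] (0, acc.2)).1], (pvStepI^[6] (0, acc.2)).2)

theorem pv_foldl_eq_iterate {α β : Type} (f : β → β) :
    ∀ (l : List α) (init : β), l.foldl (fun a _ => f a) init = f^[l.length] init := by
  intro l
  induction l with
  | nil => intro init; rfl
  | cons x xs ih =>
      intro init
      simp [List.foldl_cons, ih, Function.iterate_succ_apply]

theorem pv_iterA (n : Nat) : ∀ (bs : List Int) (s : Int),
    pvStepA^[n] (bs, s) = (bs ++ pvGenBits n s, pvStep^[n] s) := by
  induction n with
  | zero => intro bs s; simp [pvGenBits]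
  | succ n ih =>
      intro bs s
      rw [Function.iterate_succ_apply, Function.iterate_succ_apply]
      show pvStepA^[n] (bs ++ [pvBit s], pvStep s) = _
      rw [ih]
      simp [pvGenBits]

theorem pv_iterI (n : Nat) : ∀ (sym s : Int),
    pvStepI^[n] (sym, s) = (List.foldl (fun a b => a * 2 + b) sym (pvGenBits n s), pvStep^[n] s) := by
  induction n with
  | zero => intro sym s; simp [pvGenBits]
  | succ n ih =>
      intro sym s
      rw [Function.iterate_succ_apply, Function.iterate_succ_apply]
      show pvStepI^[n] (sym * 2 + pvBit s, pvStep s) = _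
      rw [ih]
      simp [pvGenBits]

theorem pv_stepB_eq (bs : List Int) (s : Int) :
    pvStepB (bs, s) = (bs ++ [pvPack6 s], pvStep^[6] s) := by
  show (bs ++ [(pvStepI^[6] (0, s)).1], (pvStepI^[6] (0, s)).2) = _
  rw [pv_iterI]
  rfl

theorem pv_iterB (k : Nat) : ∀ (bs : List Int) (s : Int),
    pvStepB^[k] (bs, s) = (bs ++ pvPackList k s, pvStep^[6 * k] s) := by
  induction k with
  | zero => intro bs s; simp [pvPackList]
  | succ k ih =>
      intro bs s
      rw [Function.iterate_succ_apply, pv_stepB_eq, ih]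
      have h2 : pvStep^[6 * k] (pvStep^[6] s) = pvStep^[6 * (k + 1)] s := by
        rw [← Function.iterate_add_apply]; congr 1
      rw [h2]
      simp [pvPackList]

theorem pvGenBits_length (n : Nat) : ∀ s, (pvGenBits n s).length = n := by
  induction n with
  | zero => intro s; rfl
  | succ n ih => intro s; simp [pvGenBits, ih]

theorem pvGenBits_add (m n : Nat) : ∀ s, pvGenBits (m + n) s = pvGenBits m s ++ pvGenBits n (pvStep^[m] s) := by
  induction m with
  | zero => intro s; simp [pvGenBits]
  | succ m ih =>
      intro s
      rw [show m + 1 + n = (m + n) + 1 by omega]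
      simp only [pvGenBits]
      rw [ih (pvStep s)]
      simp [Function.iterate_succ_apply]

theorem pvPackList_length (k : Nat) : ∀ s, (pvPackList k s).length = k := by
  induction k with
  | zero => intro s; rfl
  | succ k ih => intro s; simp [pvPackList, ih]

theorem pvPackList_getElem (k : Nat) : ∀ (s : Int) (j : Nat) (h : j < k),
    (pvPackList k s)[j]'(by rw [pvPackList_length]; exact h) = pvPack6 (pvStep^[6 * j] s) := by
  induction k with
  | zero => intro s j h; omega
  | succ k ih =>
      intro s j h
      cases j with
      | zero => simp [pvPackList]
      | succ j =>
          show (pvPackList k (pvStep^[6] s))[j]'_ = _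
          have h2 : pvStep^[6 * (j + 1)] s = pvStep^[6 * j] (pvStep^[6] s) := by
            rw [← Function.iterate_add_apply]; congr 1
          rw [h2]
          exact ih (pvStep^[6] s) j (by omega)

theorem pvBit01 (s : Int) : pvBit s = 0 ∨ pvBit s = 1 := by
  have h : PySem.Int.band s 0x40 = 0 ∨ PySem.Int.band s 0x40 = 64 := by
    unfold PySem.Int.band
    have h64 : Int.toNat 64 = 64 := rfl
    by_cases hs : (0:Int) ≤ s
    · simp only [hs, if_true]
      norm_num [h64]
      have h2 : s.toNat &&& 64 = (s.toNat.testBit 6).toNat * 64 := by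
        have := Nat.and_two_pow s.toNat 6
        norm_num at this
        exact this
      rw [h2]
      cases s.toNat.testBit 6 <;> simp
    · simp only [hs, if_false]
      norm_num [h64]
      have h2 : (-s).toNat - 1 &&& 64 = (((-s).toNat - 1).testBit 6).toNat * 64 := by
        have := Nat.and_two_pow ((-s).toNat - 1) 6
        norm_num at this
        exact this
      rw [Nat.and_comm 64 ((-s).toNat - 1), h2]
      cases ((-s).toNat - 1).testBit 6 <;> simp
  unfold pvBit
  rcases h with h | h <;> rw [h]
  · left; decide
  · right; decide

theorem pvParse6 (b1 b2 b3 b4 b5 b6 : Int)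
    (h1 : b1 = 0 ∨ b1 = 1) (h2 : b2 = 0 ∨ b2 = 1) (h3 : b3 = 0 ∨ b3 = 1)
    (h4 : b4 = 0 ∨ b4 = 1) (h5 : b5 = 0 ∨ b5 = 1) (h6 : b6 = 0 ∨ b6 = 1) :
    (PySem.Int.ofStrBase? (PySem.Str.join "" ([b1, b2, b3, b4, b5, b6].map PySem.Int.toStr)) 2).getD 0
      = List.foldl (fun a b => a * 2 + b) 0 [b1, b2, b3, b4, b5, b6] := by
  rcases h1 with rfl | rfl <;> rcases h2 with rfl | rfl <;> rcases h3 with rfl | rfl <;>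
    rcases h4 with rfl | rfl <;> rcases h5 with rfl | rfl <;> rcases h6 with rfl | rfl <;> decide

theorem pvGenBits6 (t : Int) :
    pvGenBits 6 t = [pvBit t, pvBit (pvStep t), pvBit (pvStep (pvStep t)),
      pvBit (pvStep (pvStep (pvStep t))), pvBit (pvStep (pvStep (pvStep (pvStep t)))),
      pvBit (pvStep (pvStep (pvStep (pvStep (pvStep t)))))] := rfl

theorem pvParseGen (t : Int) :
    (PySem.Int.ofStrBase? (PySem.Str.join "" ((pvGenBits 6 t).map PySem.Int.toStr)) 2).getD 0
      = pvPack6 t := by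
  rw [pvGenBits6, pvPack6, pvGenBits6]
  exact pvParse6 _ _ _ _ _ _ (pvBit01 _) (pvBit01 _) (pvBit01 _) (pvBit01 _) (pvBit01 _) (pvBit01 _)

theorem pvMapEq (k : Nat) (s : Int) :
    (PySem.List.pyRange 0 (k : Int) 1).map (fun i =>
      (PySem.Int.ofStrBase?
        (PySem.Str.join "" ((PySem.List.slice (pvGenBits (6 * k) s) (some (i * 6)) (some ((i + 1) * 6))).map PySem.Int.toStr)) 2).getD 0)
      = pvPackList k s := by
  apply List.ext_getElem
  · simp [PySem.List.length_pyRange_one, pvPackList_length]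
  · intro j hj hj2
    rw [pvPackList_length] at hj2
    simp only [List.getElem_map, PySem.List.getElem_pyRange_one, zero_add]
    rw [pvPackList_getElem k s j hj2]
    have hslice : PySem.List.slice (pvGenBits (6 * k) s) (some ((j : Int) * 6)) (some (((j : Int) + 1) * 6))
        = pvGenBits 6 (pvStep^[6 * j] s) := by
      have e1 : ((j : Int) * 6) = ((6 * j : Nat) : Int) := by push_cast; ring
      have e2 : (((j : Int) + 1) * 6) = ((6 * j : Nat) : Int) + ((6 : Nat) : Int) := by push_cast; ring
      rw [e1, e2, PySem.List.slice_natCast_add]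
      have hk : 6 * k = 6 * j + (6 + 6 * (k - j - 1)) := by omega
      rw [hk, pvGenBits_add]
      rw [List.drop_left' (pvGenBits_length (6 * j) s)]
      rw [pvGenBits_add 6 (6 * (k - j - 1))]
      rw [List.take_left' (pvGenBits_length 6 _)]
    rw [hslice, pvParseGen]

theorem lfsr7_symbols_py_spec_aux (seed : Int) (nsym : Int) :
    lfsr7_symbols_py seed nsym = lfsr7_symbols_py_alt seed nsym := by
  simp only [lfsr7_symbols_py, lfsr7_symbols_py_alt]
  have hIn : ∀ t : Int, (PySem.List.pyRange 0 6 1).foldl lfsr7B_inner (0, t) = pvStepI^[6] (0, t) := by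
    intro t
    rw [show lfsr7B_inner = (fun p (_ : Int) => pvStepI p) from rfl, pv_foldl_eq_iterate]
    rfl
  have hB : lfsr7B_body = (fun acc (_ : Int) => pvStepB acc) := by
    funext acc x
    simp only [lfsr7B_body, hIn]
    rfl
  rw [show lfsr7A_body = (fun acc (_ : Int) => pvStepA acc) from rfl, hB,
    pv_foldl_eq_iterate, pv_foldl_eq_iterate, pv_iterA, pv_iterB]
  simp only [List.nil_append]
  by_cases h : nsym ≤ 0
  · rw [PySem.List.pyRange_one_eq_nil h]
    simp [PySem.List.length_pyRange_one, pvPackList]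
  · obtain ⟨k, hk⟩ : ∃ k : Nat, nsym = (k : Int) := ⟨nsym.toNat, by omega⟩
    subst hk
    have h1 : (PySem.List.pyRange 0 ((k : Int) * 6) 1).length = 6 * k := by
      rw [PySem.List.length_pyRange_one]; omega
    have h2 : (PySem.List.pyRange 0 (k : Int) 1).length = k := by
      rw [PySem.List.length_pyRange_one]; omega
    rw [h1, h2]
    exact pvMapEq k _

-- ===== VERDICT (by name: the statement is the Claim_ definition above) =====
theorem lfsr7_symbols_py_spec : Claim_equal_lfsr7_symbols_py := by
  intro seed nsym _
  unfold Spec_lfsr7_symbols_py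
  exact lfsr7_symbols_py_spec_aux seed nsym
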